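-- pv_equiv track=rewrite | github.com/VanshAggarwal881/DSAwithPython | 13_Minimum_Rearranged_Number/main.py | MinimumInteger
-- ===== SOURCE A (Python) =====
-- def MinimumInteger(num):
--     if num == 0:
--         return 0
--
--     is_negative = num < 0
--
--     # don't care if it is negative just make it absolute for further working.
--     absnum = abs(num)
--
--     # convert the integer in list
--     digits = [int(digit) for digit in str(absnum)]
--
--     # 1 if postive no. sort in asc without leading 0 else in desc
--
--     if not is_negative:
--         digits.sort()
--
--         if digits[0] == 0:
--             for i in range(1 , len(digits)):
--
--                 if digits[i] > 0:
--
--                     digits[0] , digits[i] = digits[i] , digits[0]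
--
--                     break
--
--     else:
--         digits.sort(reverse=True)
--
--     # the sorted list has been generated now convert it back into int
--     result = int("".join(str(d) for d in digits))
--
--     if is_negative:
--         result = -result
--     return result
-- ===== SOURCE B (Python) =====
-- def MinimumInteger(num):
--     if num == 0:
--         return 0
--     ds = [int(ch) for ch in str(abs(num))]
--     cnt = [ds.count(d) for d in range(10)]
--     if num > 0:
--         # counting-sort emit: smallest positive digit first, then the zeros, then the rest ascending
--         lead = next(d for d in range(1, 10) if cnt[d] > 0)
--         out = [lead] + [0] * cnt[0] + [d for d in range(1, 10)
--                                        for _ in range(cnt[d] - (1 if d == lead else 0))]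
--         return int("".join(str(d) for d in out))
--     else:
--         out = [d for d in range(9, -1, -1) for _ in range(cnt[d])]
--         return -int("".join(str(d) for d in out))
-- ===== Notes on version B (the rewrite author's own statement) =====
-- stated objective: alternative
-- what changed: Replaces A's comparison sort of the digit list plus the scan-and-swap patch for the leading zero by a per-digit frequency table and a direct counting-sort emit pass (smallest positive digit first, then the zeros, then the remaining digits ascending; descending emit for negatives).
import Mathlib
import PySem

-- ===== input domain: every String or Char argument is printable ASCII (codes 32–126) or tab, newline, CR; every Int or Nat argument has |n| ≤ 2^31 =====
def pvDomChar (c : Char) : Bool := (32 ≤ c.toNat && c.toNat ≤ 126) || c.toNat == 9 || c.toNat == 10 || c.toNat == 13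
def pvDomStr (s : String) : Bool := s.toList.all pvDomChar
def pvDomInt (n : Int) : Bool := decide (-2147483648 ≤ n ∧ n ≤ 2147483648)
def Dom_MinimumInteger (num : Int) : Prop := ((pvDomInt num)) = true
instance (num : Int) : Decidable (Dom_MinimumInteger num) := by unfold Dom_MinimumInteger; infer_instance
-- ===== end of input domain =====

-- B replaces A's comparison sort plus leading-zero swap patch by a digit-frequency
-- tabulation and a direct counting-sort emit pass (alternative algorithm, same cost class).

-- ===== SHARED str/int HELPERS (both Pythons perform these identical conversions) =====

-- int(ch) for a single decimal-digit character ch; exact on the digit characters produced by str(abs(num))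
def pvCharVal (c : Char) : Int := (c.toNat : Int) - 48

-- [int(ch) for ch in str(n)] for n ≥ 0
def pvDigitsOf (n : Int) : List Int := (PySem.Int.toChars n).map pvCharVal

-- int("".join(str(d) for d in ds)); the .getD 0 default is never reached: ds is a nonempty list of digits
def pvDigitsToInt (ds : List Int) : Int :=
  (PySem.Int.ofStr? (PySem.Str.join "" (ds.map PySem.Int.toStr))).getD 0

-- ===== PORT A =====

-- for i in range(1, len(s)): if s[i] > 0: s[0], s[i] = s[i], s[0]; break
def pvSwapFirstPos (s : List Int) : List Int :=
  match (PySem.List.pyRange 1 (PySem.List.len s) 1).find?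
          (fun i => decide (0 < PySem.List.pyGetD s i 0)) with
  | some i =>
      PySem.List.pySetD (PySem.List.pySetD s 0 (PySem.List.pyGetD s i 0)) i
        (PySem.List.pyGetD s 0 0)
  | none => s

def MinimumInteger (num : Int) : Int :=
  if num = 0 then 0
  else
    let isNeg : Bool := decide (num < 0)
    let absnum : Int := |num|
    let digits : List Int := pvDigitsOf absnum
    let digits' : List Int :=
      if !isNeg then
        let s := PySem.List.sorted digits (fun x => x) false
        if PySem.List.pyGetD s 0 0 = 0 then pvSwapFirstPos s else s
      else
        PySem.List.sorted digits (fun x => x) true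
    let result : Int := pvDigitsToInt digits'
    if isNeg then -result else result

-- ===== PORT B =====

-- counts are nonnegative ints in Python; PySem.List.count returns the same values as Nat.
-- Python's [d]*(cnt[d] - 1) is [] when cnt[d] = 0, exactly as Nat subtraction gives replicate 0.
def MinimumInteger_alt (num : Int) : Int :=
  if num = 0 then 0
  else
    let ds : List Int := pvDigitsOf |num|
    let cnt : List Nat := (PySem.List.pyRange 0 10 1).map (fun d => PySem.List.count ds d)
    if 0 < num then
      -- next(d for d in range(1,10) if cnt[d] > 0): a positive digit always exists since abs(num) ≥ 1,
      -- so the .getD 0 default is never reached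
      let lead : Int :=
        ((PySem.List.pyRange 1 10 1).find? (fun d => decide (0 < PySem.List.pyGetD cnt d 0))).getD 0
      let out : List Int :=
        lead :: (List.replicate (PySem.List.pyGetD cnt 0 0) (0 : Int)
          ++ (PySem.List.pyRange 1 10 1).flatMap
              (fun d => List.replicate (PySem.List.pyGetD cnt d 0 - (if d = lead then 1 else 0)) d))
      pvDigitsToInt out
    else
      let out : List Int :=
        ((PySem.List.pyRange 9 (-1) (-1)).flatMap
          (fun d => List.replicate (PySem.List.pyGetD cnt d 0) d)) ;
      -(pvDigitsToInt out)

-- ===== PRECONDITION & SPEC =====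
def Spec_MinimumInteger (num : Int) (out : Int) : Prop := out = MinimumInteger_alt num
instance (num : Int) (out : Int) : Decidable (Spec_MinimumInteger num out) := by unfold Spec_MinimumInteger; infer_instance

-- ===== CLAIM (what is proved, stated in full; the proofs are below) =====
def Claim_equal_MinimumInteger : Prop := ∀ (num : Int), Dom_MinimumInteger num → Spec_MinimumInteger num (MinimumInteger num)

-- ===== LEMMAS AND PROOFS =====

-- the multiset expansion at the heart of counting sort
def pvExpand (cN : Int → Nat) (bs : List Int) : List Int :=
  bs.flatMap fun d => List.replicate (cN d) d

theorem pv_flatMap_congr {α β : Type} (l : List α) (f g : α → List β)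
    (h : ∀ x ∈ l, f x = g x) : l.flatMap f = l.flatMap g := by
  induction l with
  | nil => rfl
  | cons b bs ih =>
    simp only [List.flatMap_cons]
    rw [h b (by simp), ih (fun x hx => h x (by simp [hx]))]

theorem pv_find?_congr {α : Type} (l : List α) (p q : α → Bool)
    (h : ∀ x ∈ l, p x = q x) : l.find? p = l.find? q := by
  induction l with
  | nil => rfl
  | cons b bs ih =>
    simp only [List.find?_cons]
    rw [h b (by simp), ih (fun x hx => h x (by simp [hx]))]

theorem pv_count_expand_not_mem (cN : Int → Nat) (bs : List Int) (x : Int)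
    (hx : x ∉ bs) : List.count x (pvExpand cN bs) = 0 := by
  induction bs with
  | nil => rfl
  | cons b bs ih =>
    simp only [pvExpand, List.flatMap_cons, List.count_append] at *
    rw [List.count_replicate, if_neg (by simp; rintro rfl; exact hx (by simp)),
        ih (fun h => hx (by simp [h]))]

theorem pv_count_expand (cN : Int → Nat) (bs : List Int) (x : Int)
    (hnd : bs.Nodup) (hx : x ∈ bs) : List.count x (pvExpand cN bs) = cN x := by
  induction bs with
  | nil => cases hx
  | cons b bs ih =>
    simp only [pvExpand, List.flatMap_cons, List.count_append] at *
    rcases List.nodup_cons.mp hnd with ⟨hb, hnd'⟩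
    rcases List.mem_cons.mp hx with rfl | hx'
    · rw [List.count_replicate, if_pos (by simp)]
      have h2 := pv_count_expand_not_mem cN bs x hb
      simp only [pvExpand] at h2
      omega
    · rw [List.count_replicate, if_neg (by simp; rintro rfl; exact hb hx'),
        ih hnd' hx']
      omega

theorem pv_expand_perm (ds bs : List Int) (hnd : bs.Nodup)
    (hcov : ∀ d ∈ ds, d ∈ bs) : (pvExpand (fun d => List.count d ds) bs).Perm ds := by
  refine List.perm_iff_count.mpr fun a => ?_
  by_cases ha : a ∈ bs
  · exact pv_count_expand _ bs a hnd ha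
  · rw [pv_count_expand_not_mem _ bs a ha,
      List.count_eq_zero.mpr (fun h => ha (hcov a h))]

theorem pv_expand_pairwise (cN : Int → Nat) (bs : List Int) (R : Int → Int → Prop)
    (hrefl : ∀ a, R a a) (hp : bs.Pairwise R) : (pvExpand cN bs).Pairwise R := by
  induction bs with
  | nil => exact List.Pairwise.nil
  | cons b bs ih =>
    simp only [pvExpand, List.flatMap_cons] at *
    rcases List.pairwise_cons.mp hp with ⟨hb, hbs⟩
    refine List.pairwise_append.mpr ⟨?_, ih hbs, ?_⟩
    · exact List.pairwise_replicate.mpr (Or.inr (hrefl b))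
    · intro x hx y hy
      obtain ⟨rfl⟩ : x = b := by simpa using (List.mem_replicate.mp hx).2
      obtain ⟨d, hd, hyd⟩ := List.mem_flatMap.mp hy
      obtain rfl : y = d := (List.mem_replicate.mp hyd).2
      exact hb y hd

theorem pv_expand_find (cN : Int → Nat) (bs : List Int) (m : Int) (hnd : bs.Nodup)
    (hfind : bs.find? (fun d => decide (0 < cN d)) = some m) :
    pvExpand cN bs = m :: pvExpand (fun d => cN d - if d = m then 1 else 0) bs := by
  induction bs with
  | nil => cases hfind
  | cons b bs ih =>
    rcases List.nodup_cons.mp hnd with ⟨hb, hnd'⟩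
    by_cases hpb : 0 < cN b
    · have hmb : m = b := by
        rw [List.find?_cons_of_pos (by simpa using hpb)] at hfind
        exact (Option.some.inj hfind).symm
      subst hmb
      simp only [pvExpand, List.flatMap_cons]
      have hblock : List.replicate (cN m) m = m :: List.replicate (cN m - 1) m := by
        conv_lhs => rw [show cN m = (cN m - 1) + 1 by omega]
        rw [List.replicate_succ]
      rw [hblock]
      simp only [List.cons_append]
      congr 2
      exact (pv_flatMap_congr bs _ _ (fun d hd => by
        rw [if_neg (by rintro rfl; exact hb hd)]
        simp)).symm
    · have hz : cN b = 0 := by omega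
      have hfind' : bs.find? (fun d => decide (0 < cN d)) = some m := by
        rwa [List.find?_cons_of_neg (by simpa using hpb)] at hfind
      have hmmem : m ∈ bs := List.mem_of_find?_eq_some hfind'
      have hbm : b ≠ m := by rintro rfl; exact hb hmmem
      simp only [pvExpand, List.flatMap_cons]
      rw [hz, if_neg hbm]
      simpa [hz] using ih hnd' hfind'

-- digits of str(n): character range and existence of a nonzero digit
theorem pv_digitChar_range : ∀ m : Nat, m < 10 →
    48 ≤ (Nat.digitChar m).toNat ∧ (Nat.digitChar m).toNat ≤ 57 := by decide

theorem pv_digitChar_pos : ∀ m : Nat, m < 10 → 0 < m →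
    49 ≤ (Nat.digitChar m).toNat ∧ (Nat.digitChar m).toNat ≤ 57 := by decide

theorem pv_toDigitsCore_range : ∀ (fuel n : Nat) (acc : List Char),
    (∀ c ∈ acc, 48 ≤ c.toNat ∧ c.toNat ≤ 57) →
    ∀ c ∈ Nat.toDigitsCore 10 fuel n acc, 48 ≤ c.toNat ∧ c.toNat ≤ 57 := by
  intro fuel
  induction fuel with
  | zero => intro n acc hacc c hc; exact hacc c hc
  | succ f ih =>
    intro n acc hacc c hc
    simp only [Nat.toDigitsCore] at hc
    split at hc
    · rcases List.mem_cons.mp hc with rfl | h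
      · exact pv_digitChar_range _ (Nat.mod_lt _ (by omega))
      · exact hacc c h
    · exact ih _ _ (by
        intro c' hc'
        rcases List.mem_cons.mp hc' with rfl | h
        · exact pv_digitChar_range _ (Nat.mod_lt _ (by omega))
        · exact hacc c' h) c hc

theorem pv_toDigitsCore_pos : ∀ (fuel n : Nat) (acc : List Char), 0 < n → n < 10 ^ fuel →
    ∃ c ∈ Nat.toDigitsCore 10 fuel n acc, 49 ≤ c.toNat ∧ c.toNat ≤ 57 := by
  intro fuel
  induction fuel with
  | zero => intro n acc hn hlt; omega
  | succ f ih =>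
    intro n acc hn hlt
    simp only [Nat.toDigitsCore]
    split
    · rename_i hdiv
      have hn10 : n < 10 := by omega
      have : n % 10 = n := Nat.mod_eq_of_lt hn10
      exact ⟨Nat.digitChar (n % 10), by simp, by rw [this]; exact pv_digitChar_pos n hn10 hn⟩
    · rename_i hdiv
      exact ih (n / 10) _ (by omega) (by
        rw [Nat.div_lt_iff_lt_mul (by omega)]
        calc n < 10 ^ (f + 1) := hlt
        _ = 10 ^ f * 10 := by ring)

theorem pv_digits_range (n : Int) (h1 : 1 ≤ n) :
    ∀ d ∈ pvDigitsOf n, 0 ≤ d ∧ d ≤ 9 := by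
  intro d hd
  obtain ⟨c, hc, rfl⟩ := List.mem_map.mp hd
  have hc' : c ∈ Nat.toDigits 10 n.toNat := by
    simpa [PySem.Int.toChars, not_lt.mpr (by omega : (0:Int) ≤ n)] using hc
  have := pv_toDigitsCore_range (n.toNat + 1) n.toNat [] (by simp) c hc'
  simp only [pvCharVal]
  omega

theorem pv_digits_pos (n : Int) (h1 : 1 ≤ n) :
    ∃ d ∈ pvDigitsOf n, 0 < d ∧ d ≤ 9 := by
  have hx : 0 < n.toNat := by omega
  have hlt : n.toNat < 10 ^ (n.toNat + 1) := by
    calc n.toNat < 10 ^ n.toNat := Nat.lt_pow_self (by omega)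
    _ ≤ 10 ^ (n.toNat + 1) := Nat.pow_le_pow_right (by omega) (by omega)
  obtain ⟨c, hc, h49, h57⟩ := pv_toDigitsCore_pos (n.toNat + 1) n.toNat [] hx hlt
  refine ⟨pvCharVal c, List.mem_map.mpr ⟨c, ?_, rfl⟩, by simp [pvCharVal]; omega⟩
  simpa [PySem.Int.toChars, not_lt.mpr (by omega : (0:Int) ≤ n)] using hc

theorem pv_getD_prefix_zero (k : Nat) (t : List Int) (j : Nat) (hj : j < k) :
    (List.replicate k (0:Int) ++ t).getD j 0 = 0 := by
  rw [List.getD_eq_getElem?_getD, List.getElem?_append_left (by simpa using hj)]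
  simp [hj]

-- the two list-building passes agree (positive case)
theorem pv_pos_lists (ds : List Int) (hrange : ∀ d ∈ ds, 0 ≤ d ∧ d ≤ 9)
    (hpos : ∃ d ∈ ds, 0 < d ∧ d ≤ 9) :
    (let s := PySem.List.sorted ds (fun x => x) false
     if PySem.List.pyGetD s 0 0 = 0 then pvSwapFirstPos s else s)
    = (let cnt : List Nat := (PySem.List.pyRange 0 10 1).map (fun d => PySem.List.count ds d)
       let lead : Int :=
         ((PySem.List.pyRange 1 10 1).find? (fun d => decide (0 < PySem.List.pyGetD cnt d 0))).getD 0
       lead :: (List.replicate (PySem.List.pyGetD cnt 0 0) (0 : Int)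
         ++ (PySem.List.pyRange 1 10 1).flatMap
             (fun d => List.replicate (PySem.List.pyGetD cnt d 0 - (if d = lead then 1 else 0)) d))) := by
  have hcnt : ∀ d : Int, 0 ≤ d → d < 10 →
      PySem.List.pyGetD ((PySem.List.pyRange 0 10 1).map (fun d => PySem.List.count ds d)) d 0
        = List.count d ds := by
    intro d h1 h2
    rw [PySem.List.pyGetD_map_pyRange_of_nonneg _ _ _ _ h1 h2]
    exact PySem.List.count_eq ds d
  -- the first nonzero digit
  obtain ⟨d0, hd0m, hd0p, hd0le⟩ := hpos
  have hfind : (([1,2,3,4,5,6,7,8,9] : List Int).find?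
      (fun d => decide (0 < List.count d ds))).isSome := by
    rw [List.find?_isSome]
    exact ⟨d0, by simp; omega, by simp [List.count_pos_iff]; exact hd0m⟩
  obtain ⟨m, hm⟩ := Option.isSome_iff_exists.mp hfind
  have hmmem : m ∈ ([1,2,3,4,5,6,7,8,9] : List Int) := List.mem_of_find?_eq_some hm
  have hm19 : 1 ≤ m ∧ m ≤ 9 := by simp at hmmem; omega
  have hmpos : 0 < List.count m ds := by simpa using List.find?_some hm
  -- B's lead is m
  have hlead : ((PySem.List.pyRange 1 10 1).find?
      (fun d => decide (0 < PySem.List.pyGetD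
        ((PySem.List.pyRange 0 10 1).map (fun d => PySem.List.count ds d)) d 0))).getD 0 = m := by
    rw [show PySem.List.pyRange 1 10 1 = [1,2,3,4,5,6,7,8,9] from by decide,
      pv_find?_congr ([1,2,3,4,5,6,7,8,9] : List Int) _
        (fun d => decide (0 < List.count d ds))
        (fun d hd => by rw [hcnt d (by simp at hd; omega) (by simp at hd; omega)]),
      hm]
    rfl
  -- A's sorted list in counting-sort form
  have hasc : PySem.List.sorted ds (fun x => x) false
      = pvExpand (fun d => List.count d ds) [0,1,2,3,4,5,6,7,8,9] := by
    apply PySem.List.sorted_id_eq_of_perm_of_pairwise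
    · exact pv_expand_perm ds _ (by decide) (fun d hd => by
        have := hrange d hd; simp; omega)
    · exact pv_expand_pairwise _ _ _ (fun a => le_refl a) (by decide)
  have hsplit : pvExpand (fun d => List.count d ds) [0,1,2,3,4,5,6,7,8,9]
      = List.replicate (List.count 0 ds) (0 : Int)
        ++ pvExpand (fun d => List.count d ds) [1,2,3,4,5,6,7,8,9] := by
    simp [pvExpand]
  have hT : pvExpand (fun d => List.count d ds) [1,2,3,4,5,6,7,8,9]
      = m :: pvExpand (fun d => List.count d ds - if d = m then 1 else 0) [1,2,3,4,5,6,7,8,9] :=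
    pv_expand_find (fun d => List.count d ds) [1,2,3,4,5,6,7,8,9] m (by decide) hm
  -- B's tail expansion in the same form
  have hBtail : ([1,2,3,4,5,6,7,8,9] : List Int).flatMap
      (fun d => List.replicate (PySem.List.pyGetD
        ((PySem.List.pyRange 0 10 1).map (fun d => PySem.List.count ds d)) d 0
          - (if d = m then 1 else 0)) d)
      = pvExpand (fun d => List.count d ds - if d = m then 1 else 0) [1,2,3,4,5,6,7,8,9] := by
    exact pv_flatMap_congr _ _ _ (fun d hd => by
      rw [hcnt d (by simp at hd; omega) (by simp at hd; omega)])
  show (if PySem.List.pyGetD (PySem.List.sorted ds (fun x => x) false) 0 0 = 0 then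
      pvSwapFirstPos (PySem.List.sorted ds (fun x => x) false)
    else PySem.List.sorted ds (fun x => x) false)
    = ((PySem.List.pyRange 1 10 1).find? (fun d => decide (0 < PySem.List.pyGetD
          ((PySem.List.pyRange 0 10 1).map (fun d => PySem.List.count ds d)) d 0))).getD 0
      :: (List.replicate (PySem.List.pyGetD
            ((PySem.List.pyRange 0 10 1).map (fun d => PySem.List.count ds d)) 0 0) (0 : Int)
        ++ (PySem.List.pyRange 1 10 1).flatMap
            (fun d => List.replicate (PySem.List.pyGetD
              ((PySem.List.pyRange 0 10 1).map (fun d => PySem.List.count ds d)) d 0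
              - (if d = ((PySem.List.pyRange 1 10 1).find? (fun d => decide (0 < PySem.List.pyGetD
                  ((PySem.List.pyRange 0 10 1).map (fun d => PySem.List.count ds d)) d 0))).getD 0
                 then 1 else 0)) d))
  rw [hlead, show PySem.List.pyRange 1 10 1 = [1,2,3,4,5,6,7,8,9] from by decide, hBtail,
    hcnt 0 (by omega) (by omega), hasc, hsplit, hT]
  rcases hc0 : List.count 0 ds with _ | k
  · -- no zeros: no swap happens
    simp only [List.replicate_zero, List.nil_append, PySem.List.pyGetD_zero,
      List.getD_cons_zero]
    rw [if_neg (by omega)]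
  · -- at least one zero: the swap fires and moves m to the front
    have hrep : List.replicate (k+1) (0:Int) = 0 :: List.replicate k 0 := List.replicate_succ ..
    rw [hrep]
    simp only [List.cons_append, PySem.List.pyGetD_zero, List.getD_cons_zero]
    set E := pvExpand (fun d => List.count d ds - if d = m then 1 else 0) [1,2,3,4,5,6,7,8,9]
      with hE
    set S := (0 : Int) :: (List.replicate k 0 ++ m :: E) with hS
    have hlenS : S.length = k + 2 + E.length := by simp [hS]; omega
    have hgk : (List.replicate k (0:Int) ++ m :: E).getD k 0 = m := by
      rw [List.getD_eq_getElem?_getD, List.getElem?_append_right (by simp)]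
      simp
    have hgk1 : S.getD (k+1) 0 = m := by rw [hS, List.getD_cons_succ]; exact hgk
    -- the loop's first hit is index k+1
    have hfd : ((PySem.List.pyRange 1 (PySem.List.len S) 1).find?
        (fun i => decide (0 < PySem.List.pyGetD S i 0))) = some ((k+1 : Nat) : Int) := by
      rw [PySem.List.len_eq, hlenS,
        PySem.List.pyRange_one_append 1 ((k+1 : Nat) : Int) ((k + 2 + E.length : Nat) : Int)
          (by push_cast; omega) (by push_cast; omega),
        List.find?_append]
      have h1 : ((PySem.List.pyRange 1 ((k+1 : Nat) : Int) 1).find?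
          (fun i => decide (0 < PySem.List.pyGetD S i 0))) = none := by
        rw [List.find?_eq_none]
        intro i hi
        rw [PySem.List.mem_pyRange_one] at hi
        have h0i : 0 ≤ i := by omega
        have hik : i.toNat < k + 1 := by omega
        have h1i : 1 ≤ i.toNat := by omega
        rcases Nat.exists_eq_add_of_le h1i with ⟨j, hj⟩
        have hjk : j < k := by omega
        rw [decide_eq_true_eq, not_lt,
          show i = ((i.toNat : Nat) : Int) by omega, PySem.List.pyGetD_natCast, hS,
          hj, Nat.add_comm 1 j, List.getD_cons_succ, pv_getD_prefix_zero k _ j hjk]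
      rw [h1, Option.none_or,
        PySem.List.pyRange_one_cons (by push_cast; omega),
        List.find?_cons_of_pos (by
          rw [decide_eq_true_eq, PySem.List.pyGetD_natCast, hgk1]
          omega)]
    show pvSwapFirstPos S = _
    unfold pvSwapFirstPos
    rw [hfd]
    simp only [PySem.List.pySetD_natCast, PySem.List.pyGetD_natCast, hgk1,
      PySem.List.pyGetD_zero]
    rw [hS, PySem.List.pySetD_of_nonneg (i := 0) (0 :: (List.replicate k 0 ++ m :: E)) m
      (le_refl 0)]
    simp only [Int.toNat_zero, List.set_cons_zero, List.set_cons_succ]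
    rw [List.set_append]
    simp only [List.length_replicate]
    rw [if_neg (Nat.lt_irrefl k)]
    simp only [Nat.sub_self, List.set_cons_zero, List.getD_cons_zero]
    rw [show (0:Int) :: E = [0] ++ E from rfl, ← List.append_assoc, ← List.replicate_succ',
      List.replicate_succ]
    simp

-- the two list-building passes agree (negative case)
theorem pv_neg_lists (ds : List Int) (hrange : ∀ d ∈ ds, 0 ≤ d ∧ d ≤ 9) :
    PySem.List.sorted ds (fun x => x) true
    = (let cnt : List Nat := (PySem.List.pyRange 0 10 1).map (fun d => PySem.List.count ds d)
       (PySem.List.pyRange 9 (-1) (-1)).flatMap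
         (fun d => List.replicate (PySem.List.pyGetD cnt d 0) d)) := by
  have hcnt : ∀ d : Int, 0 ≤ d → d < 10 →
      PySem.List.pyGetD ((PySem.List.pyRange 0 10 1).map (fun d => PySem.List.count ds d)) d 0
        = List.count d ds := by
    intro d h1 h2
    rw [PySem.List.pyGetD_map_pyRange_of_nonneg _ _ _ _ h1 h2]
    exact PySem.List.count_eq ds d
  show PySem.List.sorted ds (fun x => x) true
      = (PySem.List.pyRange 9 (-1) (-1)).flatMap
          (fun d => List.replicate
            (PySem.List.pyGetD ((PySem.List.pyRange 0 10 1).map (fun d => PySem.List.count ds d)) d 0) d)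
  rw [show PySem.List.pyRange 9 (-1) (-1) = [9,8,7,6,5,4,3,2,1,0] from by decide,
    pv_flatMap_congr ([9,8,7,6,5,4,3,2,1,0] : List Int) _
      (fun d => List.replicate (List.count d ds) d)
      (fun d hd => by rw [hcnt d (by simp at hd; omega) (by simp at hd; omega)])]
  refine List.eq_of_perm_of_sorted (le := fun a b => b ≤ a)
    (fun a b _ _ h1 h2 => le_antisymm h2 h1)
    (PySem.List.sorted_pairwise_rev ds _)
    (pv_expand_pairwise _ _ _ (fun a => le_refl a) (by decide)) ?_
  exact (PySem.List.sorted_perm ds _ true).trans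
    (pv_expand_perm ds _ (by decide) (fun d hd => by
      have := hrange d hd; simp; omega)).symm

-- ===== VERDICT (by name: the statement is the Claim_ definition above) =====
theorem MinimumInteger_spec : Claim_equal_MinimumInteger := by
  intro num _
  unfold Spec_MinimumInteger MinimumInteger MinimumInteger_alt
  by_cases h0 : num = 0
  · simp [h0]
  rw [if_neg h0, if_neg h0]
  by_cases hneg : num < 0
  · have hpos' : ¬ 0 < num := by omega
    simp only [hneg, decide_true, Bool.not_true, Bool.false_eq_true, if_false, if_neg hpos',
      if_true]
    rw [pv_neg_lists (pvDigitsOf |num|) (pv_digits_range _ (by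
      rcases abs_cases num with ⟨h, _⟩ | ⟨h, _⟩ <;> omega))]
  · have hpos' : 0 < num := by omega
    simp only [hneg, decide_false, Bool.not_false, if_true, if_pos hpos']
    rw [pv_pos_lists (pvDigitsOf |num|)
      (pv_digits_range _ (by rcases abs_cases num with ⟨h, _⟩ | ⟨h, _⟩ <;> omega))
      (pv_digits_pos _ (by rcases abs_cases num with ⟨h, _⟩ | ⟨h, _⟩ <;> omega))]
    simp
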